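-- pv_equiv track=rewrite | github.com/IIT25/algorithms_in_bioinformatics_project1 | sp_approximation.py | backtrack_from_score_matrix
-- ===== SOURCE A (Python) =====
-- def backtrack_from_score_matrix(i: int, j: int, sequences: list, score_matrix: list, cost_matrix: list, gapcost: int, alphabet: list, alignment1: str = '', alignment2: str = ''):
--     if i > 0 and j > 0 and score_matrix[i][j] == score_matrix[i-1][j-1] + cost_matrix[alphabet.index(sequences[0][j-1])][alphabet.index(sequences[1][i-1])]:
--         alignment1 += sequences[0][j-1]
--         alignment2 += sequences[1][i-1]
--         return backtrack_from_score_matrix(i-1, j-1, sequences, score_matrix, cost_matrix, gapcost, alphabet, alignment1, alignment2)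
--     elif i > 0 and j >= 0 and score_matrix[i][j] == score_matrix[i-1][j] + gapcost:
--         alignment1 += '-'
--         alignment2 += sequences[1][i-1]
--         return backtrack_from_score_matrix(i-1, j, sequences, score_matrix, cost_matrix, gapcost, alphabet, alignment1, alignment2)
--     elif i >= 0 and j > 0 and score_matrix[i][j] == score_matrix[i][j-1] + gapcost:
--         alignment1 += sequences[0][j-1]
--         alignment2 += '-'
--         return backtrack_from_score_matrix(i, j-1, sequences, score_matrix, cost_matrix, gapcost, alphabet, alignment1, alignment2)
--     return alignment1[::-1], alignment2[::-1] #The alignments were filled from back to front, so we must invert the string of each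
-- ===== SOURCE B (Python) =====
-- def _next_move(i, j, sequences, score_matrix, cost_matrix, gapcost, alphabet):
--     if i > 0:
--         if j > 0 and score_matrix[i][j] == score_matrix[i-1][j-1] + cost_matrix[alphabet.index(sequences[0][j-1])][alphabet.index(sequences[1][i-1])]:
--             return 'D'
--         if j >= 0 and score_matrix[i][j] == score_matrix[i-1][j] + gapcost:
--             return 'U'
--     if j > 0 and i >= 0 and score_matrix[i][j] == score_matrix[i][j-1] + gapcost:
--         return 'L'
--     return None
--
-- def backtrack_from_score_matrix(i: int, j: int, sequences: list, score_matrix: list, cost_matrix: list, gapcost: int, alphabet: list, alignment1: str = '', alignment2: str = ''):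
--     # Phase 1: walk the matrix once, recording only the move taken at each cell.
--     moves = []
--     m = _next_move(i, j, sequences, score_matrix, cost_matrix, gapcost, alphabet)
--     while m is not None:
--         moves.append((m, i, j))
--         if m != 'L':
--             i -= 1
--         if m != 'U':
--             j -= 1
--         m = _next_move(i, j, sequences, score_matrix, cost_matrix, gapcost, alphabet)
--     # Phase 2: render both alignment strings front-to-back from the reversed move list.
--     moves.reverse()
--     top = ''.join('-' if mv == 'U' else sequences[0][jj-1] for (mv, ii, jj) in moves)
--     bot = ''.join('-' if mv == 'L' else sequences[1][ii-1] for (mv, ii, jj) in moves)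
--     return top + alignment1[::-1], bot + alignment2[::-1]
-- ===== Notes on version B (the rewrite author's own statement) =====
-- stated objective: alternative
-- what changed: A's string-accumulating tail recursion is replaced by a two-phase design: an iterative loop with an Option-returning move classifier first records the (move,i,j) path as a list, then both alignment strings are rendered in one map each over the reversed path and glued to the reversed initial alignments.
import Mathlib
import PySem

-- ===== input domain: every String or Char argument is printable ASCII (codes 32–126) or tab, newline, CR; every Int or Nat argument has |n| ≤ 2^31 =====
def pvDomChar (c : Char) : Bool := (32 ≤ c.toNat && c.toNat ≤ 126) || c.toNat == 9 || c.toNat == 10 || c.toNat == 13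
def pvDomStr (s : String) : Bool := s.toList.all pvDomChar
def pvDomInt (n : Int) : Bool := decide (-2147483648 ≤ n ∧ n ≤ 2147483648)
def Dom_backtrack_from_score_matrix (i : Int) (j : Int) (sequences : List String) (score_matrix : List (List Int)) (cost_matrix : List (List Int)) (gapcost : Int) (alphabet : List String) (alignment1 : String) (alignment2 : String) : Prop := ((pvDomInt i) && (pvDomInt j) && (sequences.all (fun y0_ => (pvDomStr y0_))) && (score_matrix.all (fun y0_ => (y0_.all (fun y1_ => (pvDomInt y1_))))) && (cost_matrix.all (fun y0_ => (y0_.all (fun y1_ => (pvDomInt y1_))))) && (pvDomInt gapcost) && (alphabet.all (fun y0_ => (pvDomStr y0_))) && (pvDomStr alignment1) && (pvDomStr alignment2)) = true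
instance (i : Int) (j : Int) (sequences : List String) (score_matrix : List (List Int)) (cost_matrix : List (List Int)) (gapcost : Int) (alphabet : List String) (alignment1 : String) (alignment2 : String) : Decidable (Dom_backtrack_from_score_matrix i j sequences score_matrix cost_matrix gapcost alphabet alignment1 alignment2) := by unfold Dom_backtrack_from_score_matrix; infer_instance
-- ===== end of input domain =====

-- ===== PORT A =====
-- B replaces A's string-accumulating tail recursion by a two-phase decomposition
-- (collect the move list, then render both strings); equivalence is about the
-- RETURN VALUE only. Shared raw accessors: exact wherever the corresponding
-- Python access does not raise (Pre_ below guarantees that along the whole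
-- backtrack path); the .getD defaults are never read inside Pre_.
def pvCell (m : List (List Int)) (r c : Int) : Int :=
  (PySem.List.pyGet? ((PySem.List.pyGet? m r).getD []) c).getD 0

def pvSeq (sequences : List String) (k : Int) : List Char :=
  ((PySem.List.pyGet? sequences k).getD "").toList

def pvChr (s : List Char) (idx : Int) : Char :=
  (PySem.List.pyGet? s idx).getD ' '

-- alphabet.index(c) for the 1-character string c
def pvIdx (alphabet : List String) (c : Char) : Int :=
  ((PySem.List.index? alphabet (String.ofList [c])).getD 0 : Nat)

-- A: tail recursion, appending to the accumulators, reversing in the base case.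
-- fuel is a totality device only: the wrapper passes i.toNat + j.toNat, which each
-- step keeps ≥ the same quantity of the new state, so fuel 0 implies i ≤ 0 ∧ j ≤ 0
-- and every branch condition is false — the fuel-0 base equals Python's base return.
def backA (fuel : Nat) (i j : Int) (sequences : List String) (score_matrix cost_matrix : List (List Int))
    (gapcost : Int) (alphabet : List String) (a1 a2 : List Char) : String × String :=
  match fuel with
  | 0 => (String.ofList a1.reverse, String.ofList a2.reverse)
  | fuel + 1 =>
    if 0 < i ∧ 0 < j ∧ pvCell score_matrix i j =
        pvCell score_matrix (i-1) (j-1) +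
          pvCell cost_matrix (pvIdx alphabet (pvChr (pvSeq sequences 0) (j-1)))
            (pvIdx alphabet (pvChr (pvSeq sequences 1) (i-1))) then
      backA fuel (i-1) (j-1) sequences score_matrix cost_matrix gapcost alphabet
        (a1 ++ [pvChr (pvSeq sequences 0) (j-1)]) (a2 ++ [pvChr (pvSeq sequences 1) (i-1)])
    else if 0 < i ∧ 0 ≤ j ∧ pvCell score_matrix i j = pvCell score_matrix (i-1) j + gapcost then
      backA fuel (i-1) j sequences score_matrix cost_matrix gapcost alphabet
        (a1 ++ ['-']) (a2 ++ [pvChr (pvSeq sequences 1) (i-1)])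
    else if 0 ≤ i ∧ 0 < j ∧ pvCell score_matrix i j = pvCell score_matrix i (j-1) + gapcost then
      backA fuel i (j-1) sequences score_matrix cost_matrix gapcost alphabet
        (a1 ++ [pvChr (pvSeq sequences 0) (j-1)]) (a2 ++ ['-'])
    else
      (String.ofList a1.reverse, String.ofList a2.reverse)

def backtrack_from_score_matrix (i : Int) (j : Int) (sequences : List String) (score_matrix : List (List Int)) (cost_matrix : List (List Int)) (gapcost : Int) (alphabet : List String) (alignment1 : String) (alignment2 : String) : String × String :=
  backA (i.toNat + j.toNat) i j sequences score_matrix cost_matrix gapcost alphabet alignment1.toList alignment2.toList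

-- ===== PORT B =====
-- B phase 0: classify the move taken at (i, j) — Python helper _next_move, with
-- its nested branch structure (the trailing 'L' test is the shared fall-through).
def nextMove (i j : Int) (sequences : List String) (score_matrix cost_matrix : List (List Int))
    (gapcost : Int) (alphabet : List String) : Option String :=
  if 0 < i then
    if 0 < j ∧ pvCell score_matrix i j =
        pvCell score_matrix (i-1) (j-1) +
          pvCell cost_matrix (pvIdx alphabet (pvChr (pvSeq sequences 0) (j-1)))
            (pvIdx alphabet (pvChr (pvSeq sequences 1) (i-1))) then some "D"
    else if 0 ≤ j ∧ pvCell score_matrix i j = pvCell score_matrix (i-1) j + gapcost then some "U"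
    else if 0 < j ∧ 0 ≤ i ∧ pvCell score_matrix i j = pvCell score_matrix i (j-1) + gapcost then some "L"
    else none
  else if 0 < j ∧ 0 ≤ i ∧ pvCell score_matrix i j = pvCell score_matrix i (j-1) + gapcost then some "L"
  else none

-- B phase 1: the while-loop recording (move, i, j) triples (same fuel device).
def collectMoves (fuel : Nat) (i j : Int) (sequences : List String) (score_matrix cost_matrix : List (List Int))
    (gapcost : Int) (alphabet : List String) : List (String × Int × Int) :=
  match fuel with
  | 0 => []
  | fuel + 1 =>
    match nextMove i j sequences score_matrix cost_matrix gapcost alphabet with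
    | none => []
    | some m =>
      (m, i, j) :: collectMoves fuel (if m == "L" then i else i - 1) (if m == "U" then j else j - 1)
        sequences score_matrix cost_matrix gapcost alphabet

-- B phase 2: render one character of each output string from one recorded move.
def renderTop (sequences : List String) (t : String × Int × Int) : Char :=
  if t.1 == "U" then '-' else pvChr (pvSeq sequences 0) (t.2.2 - 1)

def renderBottom (sequences : List String) (t : String × Int × Int) : Char :=
  if t.1 == "L" then '-' else pvChr (pvSeq sequences 1) (t.2.1 - 1)

def backtrack_from_score_matrix_alt (i : Int) (j : Int) (sequences : List String) (score_matrix : List (List Int)) (cost_matrix : List (List Int)) (gapcost : Int) (alphabet : List String) (alignment1 : String) (alignment2 : String) : String × String :=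
  let moves := (collectMoves (i.toNat + j.toNat) i j sequences score_matrix cost_matrix gapcost alphabet).reverse
  (String.ofList (moves.map (renderTop sequences) ++ alignment1.toList.reverse),
   String.ofList (moves.map (renderBottom sequences) ++ alignment2.toList.reverse))

-- ===== PRECONDITION & SPEC =====
-- Pre_ is a closed-form SUFFICIENT guarantee that every matrix cell, sequence character,
-- alphabet lookup and cost-matrix entry the backtrack path can touch is in range / present,
-- so the Python never raises (IndexError/ValueError). It is narrower than the exact no-raise
-- set: A can also return on inputs whose out-of-range cells happen never to be visited
-- because a branch condition fails first; such path-dependent cases are excluded.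
def Pre_backtrack_from_score_matrix (i : Int) (j : Int) (sequences : List String) (score_matrix : List (List Int)) (cost_matrix : List (List Int)) (gapcost : Int) (alphabet : List String) (alignment1 : String) (alignment2 : String) : Prop :=
  (0 ≤ i ∧ 0 ≤ j ∧ (0 < i ∨ 0 < j) →
      i < (score_matrix.length : Int) ∧
      (score_matrix.take (i.toNat + 1)).all (fun r => decide (j < (r.length : Int))) = true) ∧
  (0 < i ∧ 0 ≤ j →
      2 ≤ sequences.length ∧ i ≤ (((sequences[1]?).getD "").toList.length : Int)) ∧
  (0 ≤ i ∧ 0 < j →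
      1 ≤ sequences.length ∧ j ≤ (((sequences[0]?).getD "").toList.length : Int)) ∧
  (0 < i ∧ 0 < j →
      (((sequences[0]?).getD "").toList.take j.toNat).all
        (fun c => (alphabet.map String.toList).contains [c]) = true ∧
      (((sequences[1]?).getD "").toList.take i.toNat).all
        (fun c => (alphabet.map String.toList).contains [c]) = true ∧
      alphabet.length ≤ cost_matrix.length ∧
      cost_matrix.all (fun r => decide (alphabet.length ≤ r.length)) = true)
instance (i : Int) (j : Int) (sequences : List String) (score_matrix : List (List Int)) (cost_matrix : List (List Int)) (gapcost : Int) (alphabet : List String) (alignment1 : String) (alignment2 : String) : Decidable (Pre_backtrack_from_score_matrix i j sequences score_matrix cost_matrix gapcost alphabet alignment1 alignment2) := by unfold Pre_backtrack_from_score_matrix; infer_instance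

def pvWitness_backtrack_from_score_matrix : Int × Int × List String × List (List Int) × List (List Int) × Int × List String × String × String :=
  (0, 0, [], [[0]], [], 0, [], "", "")

def Spec_backtrack_from_score_matrix (i : Int) (j : Int) (sequences : List String) (score_matrix : List (List Int)) (cost_matrix : List (List Int)) (gapcost : Int) (alphabet : List String) (alignment1 : String) (alignment2 : String) (out : String × String) : Prop := out = backtrack_from_score_matrix_alt i j sequences score_matrix cost_matrix gapcost alphabet alignment1 alignment2
instance (i : Int) (j : Int) (sequences : List String) (score_matrix : List (List Int)) (cost_matrix : List (List Int)) (gapcost : Int) (alphabet : List String) (alignment1 : String) (alignment2 : String) (out : String × String) : Decidable (Spec_backtrack_from_score_matrix i j sequences score_matrix cost_matrix gapcost alphabet alignment1 alignment2 out) := by unfold Spec_backtrack_from_score_matrix; infer_instance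

-- ===== CLAIM (what is proved, stated in full; the proofs are below) =====
def Claim_equal_backtrack_from_score_matrix : Prop := ∀ (i : Int) (j : Int) (sequences : List String) (score_matrix : List (List Int)) (cost_matrix : List (List Int)) (gapcost : Int) (alphabet : List String) (alignment1 : String) (alignment2 : String), Dom_backtrack_from_score_matrix i j sequences score_matrix cost_matrix gapcost alphabet alignment1 alignment2 → Pre_backtrack_from_score_matrix i j sequences score_matrix cost_matrix gapcost alphabet alignment1 alignment2 → Spec_backtrack_from_score_matrix i j sequences score_matrix cost_matrix gapcost alphabet alignment1 alignment2 (backtrack_from_score_matrix i j sequences score_matrix cost_matrix gapcost alphabet alignment1 alignment2)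

-- ===== LEMMAS AND PROOFS =====
-- nextMove, flattened to A's three sequential branch conditions.
theorem nextMove_cases (i j : Int) (sequences : List String) (sm cm : List (List Int))
    (g : Int) (alph : List String) :
    nextMove i j sequences sm cm g alph =
      (if 0 < i ∧ 0 < j ∧ pvCell sm i j =
          pvCell sm (i-1) (j-1) +
            pvCell cm (pvIdx alph (pvChr (pvSeq sequences 0) (j-1)))
              (pvIdx alph (pvChr (pvSeq sequences 1) (i-1))) then some "D"
       else if 0 < i ∧ 0 ≤ j ∧ pvCell sm i j = pvCell sm (i-1) j + g then some "U"
       else if 0 ≤ i ∧ 0 < j ∧ pvCell sm i j = pvCell sm i (j-1) + g then some "L"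
       else none) := by
  unfold nextMove
  split_ifs <;> first | rfl | omega

-- A's recursion equals: collect the move list, reverse it, render each side, and
-- append the reversed starting accumulator.
theorem backA_eq_collect (fuel : Nat) :
    ∀ (i j : Int) (sequences : List String) (sm cm : List (List Int)) (g : Int)
      (alph : List String) (a1 a2 : List Char),
    backA fuel i j sequences sm cm g alph a1 a2 =
      (String.ofList ((collectMoves fuel i j sequences sm cm g alph).reverse.map (renderTop sequences) ++ a1.reverse),
       String.ofList ((collectMoves fuel i j sequences sm cm g alph).reverse.map (renderBottom sequences) ++ a2.reverse)) := by
  induction fuel with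
  | zero => intros; rfl
  | succ n ih =>
      intro i j sequences sm cm g alph a1 a2
      simp only [backA, collectMoves, nextMove_cases]
      split_ifs with h1 h2 h3
      · rw [ih]
        simp [renderTop, renderBottom, List.map_append, List.append_assoc]
      · rw [ih]
        simp [renderTop, renderBottom, List.map_append, List.append_assoc]
      · rw [ih]
        simp [renderTop, renderBottom, List.map_append, List.append_assoc]
      · rfl

theorem pvWitness_ok :
    Dom_backtrack_from_score_matrix (pvWitness_backtrack_from_score_matrix.1) (pvWitness_backtrack_from_score_matrix.2.1) (pvWitness_backtrack_from_score_matrix.2.2.1) (pvWitness_backtrack_from_score_matrix.2.2.2.1) (pvWitness_backtrack_from_score_matrix.2.2.2.2.1) (pvWitness_backtrack_from_score_matrix.2.2.2.2.2.1) (pvWitness_backtrack_from_score_matrix.2.2.2.2.2.2.1) (pvWitness_backtrack_from_score_matrix.2.2.2.2.2.2.2.1) (pvWitness_backtrack_from_score_matrix.2.2.2.2.2.2.2.2) ∧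
    Pre_backtrack_from_score_matrix (pvWitness_backtrack_from_score_matrix.1) (pvWitness_backtrack_from_score_matrix.2.1) (pvWitness_backtrack_from_score_matrix.2.2.1) (pvWitness_backtrack_from_score_matrix.2.2.2.1) (pvWitness_backtrack_from_score_matrix.2.2.2.2.1) (pvWitness_backtrack_from_score_matrix.2.2.2.2.2.1) (pvWitness_backtrack_from_score_matrix.2.2.2.2.2.2.1) (pvWitness_backtrack_from_score_matrix.2.2.2.2.2.2.2.1) (pvWitness_backtrack_from_score_matrix.2.2.2.2.2.2.2.2) := by
  decide

-- ===== VERDICT (by name: the statement is the Claim_ definition above) =====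
theorem backtrack_from_score_matrix_spec : Claim_equal_backtrack_from_score_matrix := by
  intro i j sequences score_matrix cost_matrix gapcost alphabet alignment1 alignment2 _ _
  unfold Spec_backtrack_from_score_matrix backtrack_from_score_matrix backtrack_from_score_matrix_alt
  exact backA_eq_collect (i.toNat + j.toNat) i j sequences score_matrix cost_matrix gapcost
    alphabet alignment1.toList alignment2.toList
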